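-- pv_equiv track=rewrite | github.com/walterjesus88/performance | performance.py | acumulado_seis
-- ===== SOURCE A (Python) =====
-- def acumulado_seis(datos_entrada):
--     nueva_entrada = datos_entrada[:5]  # Copiar los primeros cinco elementos de la lista original
--     acumulado = 0
--     sumatorio=[]
--     i=0
--     for i in range(6):
--         acumulado=0
--         for valor in datos_entrada[5:]:
--             acumulado += int(valor[i])
--         sumatorio.append(str(acumulado))
--     nueva_entrada.append(sumatorio)
--     return nueva_entrada
-- ===== SOURCE B (Python) =====
-- def acumulado_seis(datos_entrada):
--     # One pass over the tail keeping six scalar accumulators (A rescans the tail six times).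
--     a0 = a1 = a2 = a3 = a4 = a5 = 0
--     for valor in datos_entrada[5:]:
--         a0 += int(valor[0])
--         a1 += int(valor[1])
--         a2 += int(valor[2])
--         a3 += int(valor[3])
--         a4 += int(valor[4])
--         a5 += int(valor[5])
--     return datos_entrada[:5] + [[str(a0), str(a1), str(a2), str(a3), str(a4), str(a5)]]
-- ===== Notes on version B (the rewrite author's own statement) =====
-- stated objective: alternative
-- what changed: A slices and rescans the tail of the list six times (once per digit column); B traverses the tail once maintaining six scalar accumulators and builds the result row at the end.
import Mathlib
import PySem

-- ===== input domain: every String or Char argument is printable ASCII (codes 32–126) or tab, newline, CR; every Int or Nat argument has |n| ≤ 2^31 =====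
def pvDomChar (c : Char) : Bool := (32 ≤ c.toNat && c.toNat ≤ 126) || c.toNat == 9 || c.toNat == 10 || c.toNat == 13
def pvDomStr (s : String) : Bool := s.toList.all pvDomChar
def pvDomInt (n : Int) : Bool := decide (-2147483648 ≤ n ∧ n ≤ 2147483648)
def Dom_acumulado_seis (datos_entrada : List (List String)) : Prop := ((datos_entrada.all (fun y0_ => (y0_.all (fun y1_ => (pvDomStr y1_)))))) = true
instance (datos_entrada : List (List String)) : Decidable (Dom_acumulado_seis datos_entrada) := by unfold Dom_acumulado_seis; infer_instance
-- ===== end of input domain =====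

-- B replaces A's six re-slicings/re-scans of the tail with one pass carrying six accumulators (a single traversal instead of six).

-- shared primitive: int(valor[i]) — defined (default 0) only because Pre_ guarantees index and parse succeed
def pvVal (v : List String) (i : Int) : Int :=
  (PySem.Int.ofStr? (PySem.List.pyGetD v i "")).getD 0

-- ===== PORT A =====
def acumulado_seis (datos_entrada : List (List String)) : List (List String) :=
  let nueva_entrada := PySem.List.slice datos_entrada none (some 5)
  let sumatorio := (PySem.List.pyRange 0 6 1).foldl
    (fun sumatorio i =>
      let acumulado := (PySem.List.slice datos_entrada (some 5) none).foldl
        (fun acumulado valor => acumulado + pvVal valor i) 0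
      sumatorio ++ [PySem.Int.toStr acumulado]) []
  nueva_entrada ++ [sumatorio]

-- ===== PORT B =====
def acumulado_seis_alt (datos_entrada : List (List String)) : List (List String) :=
  let t := (PySem.List.slice datos_entrada (some 5) none).foldl
    (fun (a : Int × Int × Int × Int × Int × Int) valor =>
      (a.1 + pvVal valor 0, a.2.1 + pvVal valor 1, a.2.2.1 + pvVal valor 2,
       a.2.2.2.1 + pvVal valor 3, a.2.2.2.2.1 + pvVal valor 4, a.2.2.2.2.2 + pvVal valor 5))
    (0, 0, 0, 0, 0, 0)
  PySem.List.slice datos_entrada none (some 5) ++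
    [[PySem.Int.toStr t.1, PySem.Int.toStr t.2.1, PySem.Int.toStr t.2.2.1,
      PySem.Int.toStr t.2.2.2.1, PySem.Int.toStr t.2.2.2.2.1, PySem.Int.toStr t.2.2.2.2.2]]

-- ===== PRECONDITION & SPEC =====
-- Pre_: every row past the first five has at least six entries and its first six entries parse as Python ints
-- (otherwise A raises IndexError / ValueError).
def Pre_acumulado_seis (datos_entrada : List (List String)) : Prop :=
  ((datos_entrada.drop 5).all (fun v =>
    decide (6 ≤ v.length) &&
    (List.range 6).all (fun i => (PySem.Int.ofStr? (v.getD i "")).isSome))) = true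
instance (datos_entrada : List (List String)) : Decidable (Pre_acumulado_seis datos_entrada) := by
  unfold Pre_acumulado_seis; infer_instance

def pvWitness_acumulado_seis : List (List String) :=
  [["1", "2", "3", "4", "5", "6"], ["a"], ["b"], ["c"], ["d"], ["-1", " 2 ", "+3", "0", "10", "7"]]

def Spec_acumulado_seis (datos_entrada : List (List String)) (out : List (List String)) : Prop := out = acumulado_seis_alt datos_entrada
instance (datos_entrada : List (List String)) (out : List (List String)) : Decidable (Spec_acumulado_seis datos_entrada out) := by unfold Spec_acumulado_seis; infer_instance

-- ===== CLAIM (what is proved, stated in full; the proofs are below) =====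
def Claim_equal_acumulado_seis : Prop := ∀ (datos_entrada : List (List String)), Dom_acumulado_seis datos_entrada → Pre_acumulado_seis datos_entrada → Spec_acumulado_seis datos_entrada (acumulado_seis datos_entrada)

-- ===== LEMMAS AND PROOFS =====

-- column sum of column i over a list of rows
def pvColSum (l : List (List String)) (i : Int) : Int :=
  l.foldl (fun a v => a + pvVal v i) 0

theorem pvColSum_cons (v : List String) (l : List (List String)) (i : Int) :
    pvColSum (v :: l) i = pvVal v i + pvColSum l i := by
  have h : ∀ (l : List (List String)) (c : Int),
      l.foldl (fun a w => a + pvVal w i) c = c + pvColSum l i := by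
    intro l
    induction l with
    | nil => intro c; simp [pvColSum]
    | cons w t ih =>
        intro c
        simp only [List.foldl, pvColSum] at *
        rw [ih (c + pvVal w i), ih (0 + pvVal w i)]
        ring
  simpa [pvColSum, List.foldl] using h l (pvVal v i)

theorem pvTupleFold (l : List (List String)) (a : Int × Int × Int × Int × Int × Int) :
    l.foldl
      (fun (a : Int × Int × Int × Int × Int × Int) valor =>
        (a.1 + pvVal valor 0, a.2.1 + pvVal valor 1, a.2.2.1 + pvVal valor 2,
         a.2.2.2.1 + pvVal valor 3, a.2.2.2.2.1 + pvVal valor 4, a.2.2.2.2.2 + pvVal valor 5)) a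
    = (a.1 + pvColSum l 0, a.2.1 + pvColSum l 1, a.2.2.1 + pvColSum l 2,
       a.2.2.2.1 + pvColSum l 3, a.2.2.2.2.1 + pvColSum l 4, a.2.2.2.2.2 + pvColSum l 5) := by
  induction l generalizing a with
  | nil => simp [pvColSum]
  | cons v t ih =>
      simp only [List.foldl, ih, pvColSum_cons]
      obtain ⟨a0, a1, a2, a3, a4, a5⟩ := a
      simp only [Prod.mk.injEq]
      refine ⟨by ring, by ring, by ring, by ring, by ring, by ring⟩

theorem pvRange6 : PySem.List.pyRange 0 6 1 = [0, 1, 2, 3, 4, 5] := by decide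

-- ===== VERDICT (by name: the statement is the Claim_ definition above) =====
theorem acumulado_seis_spec : Claim_equal_acumulado_seis := by
  intro d _ _
  unfold Spec_acumulado_seis acumulado_seis acumulado_seis_alt
  rw [pvRange6, pvTupleFold]
  simp only [List.foldl, List.nil_append, zero_add]
  rfl
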